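-- pv_equiv track=rewrite | github.com/dacut/scratchstack-aws-signature | coverage-fixup.py | is_rust_hash
-- ===== SOURCE A (Python) =====
-- import string
--
-- def is_rust_hash(s):
--     if s.startswith("h"):
--         for i in s[1:]:
--             if i not in string.hexdigits:
--                 return False
--         return True
--     else:
--         return False
-- ===== SOURCE B (Python) =====
-- import re
--
-- _HEX_TAIL = re.compile(r"[0-9a-fA-F]*")
--
-- def is_rust_hash(s):
--     return s.startswith("h") and _HEX_TAIL.fullmatch(s[1:]) is not None
-- ===== Notes on version B (the rewrite author's own statement) =====
-- stated objective: idiomatic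
-- what changed: Replaced the explicit per-character loop with early returns by a single precompiled regex fullmatch of the hex tail behind the startswith guard.
import Mathlib
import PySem

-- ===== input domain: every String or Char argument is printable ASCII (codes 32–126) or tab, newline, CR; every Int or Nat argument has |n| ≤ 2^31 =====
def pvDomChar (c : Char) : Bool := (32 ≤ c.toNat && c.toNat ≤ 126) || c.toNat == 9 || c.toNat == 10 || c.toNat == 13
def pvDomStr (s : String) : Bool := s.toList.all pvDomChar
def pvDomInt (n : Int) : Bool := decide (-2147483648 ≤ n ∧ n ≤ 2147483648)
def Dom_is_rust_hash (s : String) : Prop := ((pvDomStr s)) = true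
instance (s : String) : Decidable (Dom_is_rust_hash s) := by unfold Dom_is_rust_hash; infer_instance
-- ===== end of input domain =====

-- B replaces A's explicit per-character loop (with early returns) by a single regex
-- fullmatch of the hex tail behind the startswith guard (objective: idiomatic).

-- ===== PORT A =====
-- string.hexdigits
def pvHexdigits : List Char := "0123456789abcdefABCDEF".toList

-- the 'for i in s[1:]: if i not in string.hexdigits: return False' loop, then 'return True'
def pvALoop : List Char → Bool
  | [] => true
  | c :: rest => if ¬ (c ∈ pvHexdigits) then false else pvALoop rest

def is_rust_hash (s : String) : Bool :=
  if PySem.Str.startswith s "h" then pvALoop (PySem.List.slice s.toList (some 1) none)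
  else false

-- ===== PORT B =====
-- the regex character class [0-9a-fA-F]
def pvHexClass (c : Char) : Bool :=
  ('0' ≤ c && c ≤ '9') || ('a' ≤ c && c ≤ 'f') || ('A' ≤ c && c ≤ 'F')

-- _HEX_TAIL.fullmatch(s[1:]) is not None  ⟺  every char of s[1:] is in the class
def is_rust_hash_alt (s : String) : Bool :=
  PySem.Str.startswith s "h" && (PySem.List.slice s.toList (some 1) none).all pvHexClass

-- ===== PRECONDITION & SPEC =====
def Spec_is_rust_hash (s : String) (out : Bool) : Prop := out = is_rust_hash_alt s
instance (s : String) (out : Bool) : Decidable (Spec_is_rust_hash s out) := by unfold Spec_is_rust_hash; infer_instance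

-- ===== CLAIM (what is proved, stated in full; the proofs are below) =====
def Claim_equal_is_rust_hash : Prop := ∀ (s : String), Dom_is_rust_hash s → Spec_is_rust_hash s (is_rust_hash s)

-- ===== LEMMAS AND PROOFS =====
theorem pv_mem_hex (c : Char) : (c ∈ pvHexdigits) ↔ pvHexClass c = true := by
  simp [pvHexdigits, pvHexClass, Char.ext_iff, Char.le_def, UInt32.le_iff_toNat_le, UInt32.ext_iff]
  omega

theorem pvALoop_eq_all (l : List Char) : pvALoop l = l.all pvHexClass := by
  induction l with
  | nil => rfl
  | cons c rest ih =>
      simp only [pvALoop, List.all_cons, ih]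
      by_cases h : c ∈ pvHexdigits
      · simp [h, (pv_mem_hex c).mp h]
      · have hc : pvHexClass c = false := by
          simpa using (fun hcl => h ((pv_mem_hex c).mpr hcl))
        simp [h, hc]

-- ===== VERDICT (by name: the statement is the Claim_ definition above) =====
theorem is_rust_hash_spec : Claim_equal_is_rust_hash := by
  intro s _
  unfold Spec_is_rust_hash is_rust_hash is_rust_hash_alt
  by_cases h : PySem.Str.startswith s "h" <;> simp [pvALoop_eq_all]
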